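-- pv_equiv track=rewrite | github.com/oscarpecher11-star/arbitragex-server | scanner.py | vel_profile
-- ===== SOURCE A (Python) =====
-- def vel_profile(title: str, cat: str) -> str:
--     t = title.lower()
--     if cat == "consoles":
--         return "retro" if any(k in t for k in ["gameboy","snes","nes","megadrive","ps1","ps2","n64","3ds","gba"]) else "default"
--     if cat == "pokemon":
--         if any(k in t for k in ["psa","bgs"]): return "psa"
--         if any(k in t for k in ["scellé","sealed","booster","coffret"]): return "sealed"
--         if any(k in t for k in ["holo","full art"]): return "holo"
--         return "default"
--     if cat == "sneakers":
--         return "hype" if any(k in t for k in ["jordan","dunk","yeezy"]) else "default"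
--     if cat == "montres":
--         return "luxury" if any(k in t for k in ["rolex","omega","breitling","patek"]) else "default"
--     return "default"
-- ===== SOURCE B (Python) =====
-- # B: invert the rule chain into per-keyword (keyword, label) pairs: collect ALL
-- # matching labels in one comprehension, then select the highest-priority label
-- # with min() over a rank table (instead of A's ordered short-circuit if-chain).
-- _KEYWORD_LABELS = {
--     "consoles": [("gameboy", "retro"), ("snes", "retro"), ("nes", "retro"),
--                  ("megadrive", "retro"), ("ps1", "retro"), ("ps2", "retro"),
--                  ("n64", "retro"), ("3ds", "retro"), ("gba", "retro")],
--     "pokemon": [("psa", "psa"), ("bgs", "psa"),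
--                 ("scellé", "sealed"), ("sealed", "sealed"),
--                 ("booster", "sealed"), ("coffret", "sealed"),
--                 ("holo", "holo"), ("full art", "holo")],
--     "sneakers": [("jordan", "hype"), ("dunk", "hype"), ("yeezy", "hype")],
--     "montres": [("rolex", "luxury"), ("omega", "luxury"),
--                 ("breitling", "luxury"), ("patek", "luxury")],
-- }
-- _RANK = {"psa": 0, "sealed": 1, "holo": 2, "retro": 0, "hype": 0, "luxury": 0}
--
-- def vel_profile(title: str, cat: str) -> str:
--     t = title.lower()
--     hits = [lab for kw, lab in _KEYWORD_LABELS.get(cat, []) if kw in t]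
--     return min(hits, key=_RANK.__getitem__, default="default")
-- ===== Notes on version B (the rewrite author's own statement) =====
-- stated objective: alternative
-- what changed: Instead of A's ordered short-circuit if/any chain, B inverts the rules into per-keyword (keyword,label) pairs, collects ALL labels whose keyword occurs in the lowered title, and selects the result as the minimum of the matched labels under a priority-rank table (default 'default' when nothing matches).
import Mathlib
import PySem

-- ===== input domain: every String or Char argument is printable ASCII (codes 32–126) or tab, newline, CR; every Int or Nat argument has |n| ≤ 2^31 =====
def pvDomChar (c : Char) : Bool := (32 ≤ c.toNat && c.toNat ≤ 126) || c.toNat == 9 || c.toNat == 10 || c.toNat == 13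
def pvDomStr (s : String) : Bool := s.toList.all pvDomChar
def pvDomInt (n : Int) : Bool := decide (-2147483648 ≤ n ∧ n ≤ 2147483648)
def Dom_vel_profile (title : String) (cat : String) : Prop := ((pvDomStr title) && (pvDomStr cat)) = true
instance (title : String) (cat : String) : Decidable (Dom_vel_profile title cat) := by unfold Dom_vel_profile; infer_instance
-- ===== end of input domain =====

-- B inverts A's ordered if/any chain into per-keyword (keyword,label) pairs: it collects all matched labels and selects the minimum under a priority rank (objective: alternative).


-- ===== PORT A =====
def vel_profile (title : String) (cat : String) : String :=
  let t := PySem.Str.lower title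
  if cat == "consoles" then
    if (["gameboy","snes","nes","megadrive","ps1","ps2","n64","3ds","gba"].any
        (fun k => PySem.Str.isIn k t)) then "retro" else "default"
  else if cat == "pokemon" then
    if (["psa","bgs"].any (fun k => PySem.Str.isIn k t)) then "psa"
    else if (["scellé","sealed","booster","coffret"].any (fun k => PySem.Str.isIn k t)) then "sealed"
    else if (["holo","full art"].any (fun k => PySem.Str.isIn k t)) then "holo"
    else "default"
  else if cat == "sneakers" then
    if (["jordan","dunk","yeezy"].any (fun k => PySem.Str.isIn k t)) then "hype" else "default"
  else if cat == "montres" then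
    if (["rolex","omega","breitling","patek"].any (fun k => PySem.Str.isIn k t)) then "luxury" else "default"
  else "default"

-- ===== PORT B =====
def velKeywordLabels : PySem.Dict String (List (String × String)) :=
  PySem.Dict.mk
    [("consoles", [("gameboy","retro"),("snes","retro"),("nes","retro"),("megadrive","retro"),
                   ("ps1","retro"),("ps2","retro"),("n64","retro"),("3ds","retro"),("gba","retro")]),
     ("pokemon", [("psa","psa"),("bgs","psa"),
                  ("scellé","sealed"),("sealed","sealed"),("booster","sealed"),("coffret","sealed"),
                  ("holo","holo"),("full art","holo")]),
     ("sneakers", [("jordan","hype"),("dunk","hype"),("yeezy","hype")]),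
     ("montres", [("rolex","luxury"),("omega","luxury"),("breitling","luxury"),("patek","luxury")])]

def velRank : PySem.Dict String Int :=
  PySem.Dict.mk [("psa",0),("sealed",1),("holo",2),("retro",0),("hype",0),("luxury",0)]

-- _RANK[lab] (__getitem__) raises KeyError only for labels absent from _RANK; every label in
-- hits comes from velKeywordLabels and is a key of velRank, so getD 0 is exact on all inputs.
def vel_profile_alt (title : String) (cat : String) : String :=
  let t := PySem.Str.lower title
  let hits := ((velKeywordLabels.getD cat []).filter (fun p => PySem.Str.isIn p.1 t)).map Prod.snd
  PySem.List.minD hits (fun lab => velRank.getD lab 0) "default"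

-- ===== PRECONDITION & SPEC =====
def Spec_vel_profile (title : String) (cat : String) (out : String) : Prop := out = vel_profile_alt title cat
instance (title : String) (cat : String) (out : String) : Decidable (Spec_vel_profile title cat out) := by unfold Spec_vel_profile; infer_instance

-- ===== CLAIM (what is proved, stated in full; the proofs are below) =====
def Claim_equal_vel_profile : Prop := ∀ (title : String) (cat : String), Dom_vel_profile title cat → Spec_vel_profile title cat (vel_profile title cat)

-- ===== LEMMAS AND PROOFS =====

-- the fold step of PySem.List.min?
def velStep (key : String → Int) : Option String → String → Option String :=
  fun acc x =>
    match acc with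
    | none => some x
    | some m => if key x < key m then some x else some m

theorem min?_eq_foldl_velStep (xs : List String) (key : String → Int) :
    PySem.List.min? xs key = xs.foldl (velStep key) none := by
  unfold PySem.List.min? velStep
  congr 1; funext acc x; cases acc <;> rfl

theorem foldl_velStep_keep (key : String → Int) (m : String) (l : List String)
    (h : ∀ y ∈ l, ¬ key y < key m) : l.foldl (velStep key) (some m) = some m := by
  induction l with
  | nil => rfl
  | cons y l ih =>
      have hy := h y (List.mem_cons_self ..)
      simp only [List.foldl_cons, velStep, if_neg hy]
      exact ih (fun z hz => h z (List.mem_cons_of_mem _ hz))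

theorem min?_replicate (n : Nat) (v : String) (key : String → Int) :
    PySem.List.min? (List.replicate n v) key = if n = 0 then none else some v := by
  cases n with
  | zero => rfl
  | succ m =>
      simp only [min?_eq_foldl_velStep, List.replicate_succ, List.foldl_cons, velStep,
        Nat.succ_ne_zero, if_false]
      exact foldl_velStep_keep key v _ (fun y hy => by
        rw [List.eq_of_mem_replicate hy]; exact lt_irrefl _)

theorem min?_append (l1 l2 : List String) (key : String → Int) :
    PySem.List.min? (l1 ++ l2) key = l2.foldl (velStep key) (PySem.List.min? l1 key) := by
  simp [min?_eq_foldl_velStep, List.foldl_append]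

-- one keyword group: the comprehension's contribution is a block of copies of its label
theorem filtmap_group_gen (K : List String) (v : String) (c : String → Bool) :
    ((K.map (fun k => (k, v))).filter (fun p => c p.1)).map Prod.snd
      = List.replicate (K.countP c) v := by
  induction K with
  | nil => rfl
  | cons k K ih =>
      by_cases h : c k = true <;>
        simp [h, ih, List.replicate_succ]

theorem filtmap_group (K : List String) (v : String) (t : String) :
    ((K.map (fun k => (k, v))).filter (fun p => PySem.Str.isIn p.1 t)).map Prod.snd
      = List.replicate (K.countP (fun k => PySem.Str.isIn k t)) v :=
  filtmap_group_gen K v (fun k => PySem.Str.isIn k t)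

theorem any_iff_countP (K : List String) (c : String → Bool) :
    K.any c = true ↔ K.countP c ≠ 0 := by
  rw [List.any_eq_true, Ne, List.countP_eq_zero]
  simp

-- selection over the pokemon block shape (ranks 0 < 1 < 2)
theorem minD_pokemon (n1 n2 n3 : Nat) :
    PySem.List.minD (List.replicate n1 "psa" ++ (List.replicate n2 "sealed" ++ List.replicate n3 "holo"))
        (fun lab => velRank.getD lab 0) "default"
      = if n1 ≠ 0 then "psa" else if n2 ≠ 0 then "sealed" else if n3 ≠ 0 then "holo" else "default" := by
  unfold PySem.List.minD
  cases n1 with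
  | succ m =>
      rw [min?_append, min?_replicate]
      simp only [Nat.succ_ne_zero, if_false]
      rw [foldl_velStep_keep _ _ _ (fun y hy => by
        rcases List.mem_append.mp hy with h | h <;>
          rw [List.eq_of_mem_replicate h] <;> decide)]
      rfl
  | zero =>
      simp only [List.replicate_zero, List.nil_append]
      cases n2 with
      | succ m =>
          rw [min?_append, min?_replicate]
          simp only [Nat.succ_ne_zero, if_false]
          rw [foldl_velStep_keep _ _ _ (fun y hy => by
            rw [List.eq_of_mem_replicate hy]; decide)]
          rfl
      | zero =>
          simp only [List.replicate_zero, List.nil_append]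
          rw [min?_replicate]
          cases n3 <;> simp

-- selection over a single constant block
theorem minD_single (n : Nat) (v : String) (key : String → Int) (d : String) :
    PySem.List.minD (List.replicate n v) key d = if n ≠ 0 then v else d := by
  unfold PySem.List.minD
  rw [min?_replicate]
  by_cases h : n = 0 <;> simp [h]

def velRankKey : String → Int := fun lab => velRank.getD lab 0

-- a category with a single constant-label rule group
theorem case_single (t : String) (K : List String) (v d : String) :
    (if K.any (fun k => PySem.Str.isIn k t) then v else d)
      = PySem.List.minD (((K.map (fun k => (k, v))).filter
          (fun p => PySem.Str.isIn p.1 t)).map Prod.snd) velRankKey d := by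
  simp only [filtmap_group, minD_single]
  set c : String → Bool := fun k => PySem.Str.isIn k t with hc
  by_cases hC : K.countP c = 0
  · have ha : K.any c = false := by
      rw [← Bool.not_eq_true, any_iff_countP]; simp [hC]
    rw [ha, if_neg (show ¬(List.countP c K ≠ 0) by simp [hC])]
    simp
  · rw [(any_iff_countP K c).mpr hC, if_pos hC]
    simp

-- the pokemon category: three prioritised rule groups
theorem case_pokemon (t : String) :
    (if (["psa","bgs"].any (fun k => PySem.Str.isIn k t)) then "psa"
     else if (["scellé","sealed","booster","coffret"].any (fun k => PySem.Str.isIn k t)) then "sealed"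
     else if (["holo","full art"].any (fun k => PySem.Str.isIn k t)) then "holo"
     else "default")
      = PySem.List.minD (((["psa","bgs"].map (fun k => (k, "psa"))
           ++ ((["scellé","sealed","booster","coffret"].map (fun k => (k, "sealed")))
           ++ (["holo","full art"].map (fun k => (k, "holo"))))).filter
          (fun p => PySem.Str.isIn p.1 t)).map Prod.snd) velRankKey "default" := by
  simp only [List.filter_append, List.map_append, filtmap_group]
  rw [show velRankKey = (fun lab => velRank.getD lab 0) from rfl, minD_pokemon]
  set c : String → Bool := fun k => PySem.Str.isIn k t with hc
  by_cases hC1 : (["psa","bgs"].countP c) = 0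
  · have ha1 : (["psa","bgs"].any c) = false := by
      rw [← Bool.not_eq_true, any_iff_countP]; simp [hC1]
    rw [ha1, if_neg (show ¬(List.countP c ["psa","bgs"] ≠ 0) by simp [hC1])]
    by_cases hC2 : (["scellé","sealed","booster","coffret"].countP c) = 0
    · have ha2 : (["scellé","sealed","booster","coffret"].any c) = false := by
        rw [← Bool.not_eq_true, any_iff_countP]; simp [hC2]
      rw [ha2, if_neg (show ¬(List.countP c ["scellé","sealed","booster","coffret"] ≠ 0) by simp [hC2])]
      by_cases hC3 : (["holo","full art"].countP c) = 0
      · have ha3 : (["holo","full art"].any c) = false := by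
          rw [← Bool.not_eq_true, any_iff_countP]; simp [hC3]
        rw [ha3, if_neg (show ¬(List.countP c ["holo","full art"] ≠ 0) by simp [hC3])]
        simp
      · rw [(any_iff_countP _ c).mpr hC3, if_pos hC3]
        simp
    · rw [(any_iff_countP _ c).mpr hC2, if_pos hC2]
      simp
  · rw [(any_iff_countP _ c).mpr hC1, if_pos hC1]
    simp

-- ===== VERDICT (by name: the statement is the Claim_ definition above) =====
theorem vel_profile_spec : Claim_equal_vel_profile := by
  intro title cat _
  unfold Spec_vel_profile vel_profile vel_profile_alt
  rcases eq_or_ne cat "consoles" with h | h1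
  · subst h
    have hl : velKeywordLabels.getD "consoles" []
        = (["gameboy","snes","nes","megadrive","ps1","ps2","n64","3ds","gba"].map
            (fun k => (k, "retro"))) := by decide
    simp only [beq_self_eq_true, if_true, hl]
    exact case_single (PySem.Str.lower title) _ "retro" "default"
  rcases eq_or_ne cat "pokemon" with h | h2
  · subst h
    have hl : velKeywordLabels.getD "pokemon" []
        = (["psa","bgs"].map (fun k => (k, "psa"))
           ++ ((["scellé","sealed","booster","coffret"].map (fun k => (k, "sealed")))
           ++ (["holo","full art"].map (fun k => (k, "holo"))))) := by decide
    have hne : (("pokemon" : String) == "consoles") = false := by decide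
    simp only [hne, Bool.false_eq_true, if_false, beq_self_eq_true, if_true, hl]
    exact case_pokemon (PySem.Str.lower title)
  rcases eq_or_ne cat "sneakers" with h | h3
  · subst h
    have hl : velKeywordLabels.getD "sneakers" []
        = (["jordan","dunk","yeezy"].map (fun k => (k, "hype"))) := by decide
    have hne1 : (("sneakers" : String) == "consoles") = false := by decide
    have hne2 : (("sneakers" : String) == "pokemon") = false := by decide
    simp only [hne1, hne2, Bool.false_eq_true, if_false, beq_self_eq_true, if_true, hl]
    exact case_single (PySem.Str.lower title) _ "hype" "default"
  rcases eq_or_ne cat "montres" with h | h4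
  · subst h
    have hl : velKeywordLabels.getD "montres" []
        = (["rolex","omega","breitling","patek"].map (fun k => (k, "luxury"))) := by decide
    have hne1 : (("montres" : String) == "consoles") = false := by decide
    have hne2 : (("montres" : String) == "pokemon") = false := by decide
    have hne3 : (("montres" : String) == "sneakers") = false := by decide
    simp only [hne1, hne2, hne3, Bool.false_eq_true, if_false, beq_self_eq_true, if_true, hl]
    exact case_single (PySem.Str.lower title) _ "luxury" "default"
  have hl : velKeywordLabels.getD cat [] = [] := by
    simp [velKeywordLabels, PySem.Dict.getD_eq_get?_getD,
      h1.symm, h2.symm, h3.symm, h4.symm, PySem.Dict.get?]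
  simp [hl, h1, h2, h3, h4, PySem.List.minD, PySem.List.min?]
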